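-- pv_equiv track=rewrite | github.com/bryanrg22/Basis_Info | backEnd/vision_layer/src/pipeline/ingest.py | _check_grounding
-- ===== SOURCE A (Python) =====
-- def _check_grounding(detection_label: str, vlm_type: str) -> bool:
--     """Check if VLM classification is grounded in detection.
--
--     Simple string matching - could be enhanced with embeddings.
--     """
--     det_lower = detection_label.lower()
--     vlm_lower = vlm_type.lower()
--
--     # Direct match
--     if det_lower in vlm_lower or vlm_lower in det_lower:
--         return True
--
--     # Common synonyms
--     synonyms = {
--         "cabinet": ["cupboard", "storage", "drawer"],
--         "appliance": ["refrigerator", "oven", "stove", "dishwasher", "microwave"],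
--         "lighting": ["light", "lamp", "fixture", "chandelier"],
--         "flooring": ["floor", "tile", "carpet", "hardwood", "vinyl"],
--         "countertop": ["counter", "surface", "worktop"],
--     }
--
--     for key, syns in synonyms.items():
--         if det_lower in [key] + syns and vlm_lower in [key] + syns:
--             return True
--
--     return False
-- ===== SOURCE B (Python) =====
-- _SYNONYM_GROUPS = [
--     ["cabinet", "cupboard", "storage", "drawer"],
--     ["appliance", "refrigerator", "oven", "stove", "dishwasher", "microwave"],
--     ["lighting", "light", "lamp", "fixture", "chandelier"],
--     ["flooring", "floor", "tile", "carpet", "hardwood", "vinyl"],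
--     ["countertop", "counter", "surface", "worktop"],
-- ]
--
-- # inverted index: word -> group id (built once)
-- _WORD_TO_GROUP = {w: i for i, group in enumerate(_SYNONYM_GROUPS) for w in group}
--
--
-- def _check_grounding(detection_label: str, vlm_type: str) -> bool:
--     det_lower = detection_label.lower()
--     vlm_lower = vlm_type.lower()
--
--     # Direct match
--     if det_lower in vlm_lower or vlm_lower in det_lower:
--         return True
--
--     # Same synonym group via two O(1) lookups
--     gd = _WORD_TO_GROUP.get(det_lower)
--     return gd is not None and _WORD_TO_GROUP.get(vlm_lower) == gd
-- ===== Notes on version B (the rewrite author's own statement) =====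
-- stated objective: alternative
-- what changed: Replaces the per-group scan over the synonym dict with an inverted index (word -> group id) built once, so the synonym check becomes two O(1) lookups compared for equality.
import Mathlib
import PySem

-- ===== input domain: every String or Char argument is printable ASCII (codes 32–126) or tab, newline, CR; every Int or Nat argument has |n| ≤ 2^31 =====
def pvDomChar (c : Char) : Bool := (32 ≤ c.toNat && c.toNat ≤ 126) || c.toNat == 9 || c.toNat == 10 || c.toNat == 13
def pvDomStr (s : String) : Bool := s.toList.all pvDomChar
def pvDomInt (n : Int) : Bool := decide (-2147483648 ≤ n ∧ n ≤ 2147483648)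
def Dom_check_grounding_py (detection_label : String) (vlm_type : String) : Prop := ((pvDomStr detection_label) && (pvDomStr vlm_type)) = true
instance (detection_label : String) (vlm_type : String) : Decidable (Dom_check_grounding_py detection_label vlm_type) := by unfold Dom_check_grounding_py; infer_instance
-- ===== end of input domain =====

-- B replaces the per-group scan over the synonym table by an inverted index (word -> group id)
-- built once, compared by two lookups; same return value, alternative structure.
-- ===== PORT A =====
def pvSynonyms : PySem.Dict String (List String) :=
  PySem.Dict.mk
    [("cabinet", ["cupboard", "storage", "drawer"]),
     ("appliance", ["refrigerator", "oven", "stove", "dishwasher", "microwave"]),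
     ("lighting", ["light", "lamp", "fixture", "chandelier"]),
     ("flooring", ["floor", "tile", "carpet", "hardwood", "vinyl"]),
     ("countertop", ["counter", "surface", "worktop"])]

def pvCheckLoop (det_lower vlm_lower : String) : List (String × List String) → Bool
  | [] => false
  | (key, syns) :: rest =>
      if (([key] ++ syns).contains det_lower && ([key] ++ syns).contains vlm_lower) then true
      else pvCheckLoop det_lower vlm_lower rest

def check_grounding_py (detection_label : String) (vlm_type : String) : Bool :=
  let det_lower := PySem.Str.lower detection_label
  let vlm_lower := PySem.Str.lower vlm_type
  if PySem.Str.isIn det_lower vlm_lower || PySem.Str.isIn vlm_lower det_lower then true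
  else pvCheckLoop det_lower vlm_lower pvSynonyms.items

-- ===== PORT B =====
def pvSynGroups : List (List String) :=
  [["cabinet", "cupboard", "storage", "drawer"],
   ["appliance", "refrigerator", "oven", "stove", "dishwasher", "microwave"],
   ["lighting", "light", "lamp", "fixture", "chandelier"],
   ["flooring", "floor", "tile", "carpet", "hardwood", "vinyl"],
   ["countertop", "counter", "surface", "worktop"]]

-- inverted index: word -> group id
def pvWordToGroup : PySem.Dict String Int :=
  (PySem.List.enumerate pvSynGroups).foldl
    (fun d p => p.2.foldl (fun d w => d.insert w p.1) d) PySem.Dict.empty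

def check_grounding_py_alt (detection_label : String) (vlm_type : String) : Bool :=
  let det_lower := PySem.Str.lower detection_label
  let vlm_lower := PySem.Str.lower vlm_type
  if PySem.Str.isIn det_lower vlm_lower || PySem.Str.isIn vlm_lower det_lower then true
  else
    match pvWordToGroup.get? det_lower with
    | none => false
    | some gd => pvWordToGroup.get? vlm_lower == some gd

-- ===== PRECONDITION & SPEC =====
def Spec_check_grounding_py (detection_label : String) (vlm_type : String) (out : Bool) : Prop := out = check_grounding_py_alt detection_label vlm_type
instance (detection_label : String) (vlm_type : String) (out : Bool) : Decidable (Spec_check_grounding_py detection_label vlm_type out) := by unfold Spec_check_grounding_py; infer_instance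

-- ===== CLAIM (what is proved, stated in full; the proofs are below) =====
def Claim_equal_check_grounding_py : Prop := ∀ (detection_label : String) (vlm_type : String), Dom_check_grounding_py detection_label vlm_type → Spec_check_grounding_py detection_label vlm_type (check_grounding_py detection_label vlm_type)

-- ===== LEMMAS AND PROOFS =====

-- proof-side: group lookup with explicit start index (last group wins, like dict.insert)
def pvLkp : List (List String) → Int → String → Option Int
  | [], _, _ => none
  | g :: rest, i, x =>
      match pvLkp rest (i + 1) x with
      | some j => some j
      | none => if g.contains x then some i else none

-- proof-side: A's loop reshaped over bare word groups
def pvLoop2 (det vlm : String) : List (List String) → Bool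
  | [] => false
  | g :: rest => if g.contains det && g.contains vlm then true else pvLoop2 det vlm rest

lemma pv_insertAll_get? (g : List String) (i : Int) :
    ∀ (d : PySem.Dict String Int) (x : String),
      (g.foldl (fun d w => d.insert w i) d).get? x =
        if g.contains x then some i else d.get? x := by
  induction g with
  | nil => intro d x; simp
  | cons w ws ih =>
      intro d x
      simp only [List.foldl_cons, ih, PySem.Dict.get?_insert, List.contains_cons]
      by_cases hx : x = w
      · simp [hx]
      · by_cases hc : ws.contains x <;> simp [hx, hc]

lemma pv_fold_get? (l : List (List String)) :
    ∀ (i : Int) (d : PySem.Dict String Int) (x : String),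
      ((PySem.List.enumerate l i).foldl
          (fun d p => p.2.foldl (fun d w => d.insert w p.1) d) d).get? x =
        (match pvLkp l i x with
         | some j => some j
         | none => d.get? x) := by
  induction l with
  | nil => intro i d x; simp [PySem.List.enumerate_nil, pvLkp]
  | cons g rest ih =>
      intro i d x
      rw [PySem.List.enumerate_cons, List.foldl_cons, ih]
      rcases h : pvLkp rest (i + 1) x with _ | j
      · simp only [pvLkp, h, pv_insertAll_get?]
        by_cases hx : x ∈ g <;> simp [hx]
      · simp [pvLkp, h]

lemma pv_lkp_ge (x : String) : ∀ (l : List (List String)) (i j : Int),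
    pvLkp l i x = some j → i ≤ j := by
  intro l
  induction l with
  | nil => intro i j h; simp [pvLkp] at h
  | cons g rest ih =>
      intro i j h
      rcases hr : pvLkp rest (i + 1) x with _ | k
      · simp only [pvLkp, hr] at h
        split at h
        · cases h; omega
        · cases h
      · simp only [pvLkp, hr] at h
        have hk := ih (i + 1) k hr
        cases h
        omega

lemma pv_lkp_none (x : String) : ∀ (l : List (List String)) (i : Int),
    (∀ g ∈ l, g.contains x = false) → pvLkp l i x = none := by
  intro l
  induction l with
  | nil => intro i _; rfl
  | cons g rest ih =>
      intro i h
      have h1 := h g (List.mem_cons_self ..)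
      simp only [pvLkp, ih (i + 1) (fun q hq => h q (List.mem_cons_of_mem _ hq)), h1]
      simp

lemma pv_loop2_false (det vlm : String) : ∀ (l : List (List String)),
    (∀ g ∈ l, g.contains det = false ∨ g.contains vlm = false) →
    pvLoop2 det vlm l = false := by
  intro l
  induction l with
  | nil => intro _; rfl
  | cons g rest ih =>
      intro h
      simp only [pvLoop2, ih (fun q hq => h q (List.mem_cons_of_mem _ hq))]
      rcases h g (List.mem_cons_self ..) with hd | hd
      · have hd' : det ∉ g := by simpa using hd
        simp [hd']
      · have hd' : vlm ∉ g := by simpa using hd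
        simp [hd']

lemma pv_loop2_eq (det vlm : String) : ∀ (l : List (List String)), l.flatten.Nodup →
    ∀ (i : Int),
    pvLoop2 det vlm l =
      (match pvLkp l i det with
       | none => false
       | some gd => pvLkp l i vlm == some gd) := by
  intro l
  induction l with
  | nil => intro _ i; rfl
  | cons g rest ih =>
      intro hnd i
      have hndr : rest.flatten.Nodup := (List.nodup_append.mp (by simpa using hnd)).2.1
      have hdisj : ∀ x ∈ g, ∀ q ∈ rest, q.contains x = false := by
        intro x hx q hq
        have hne := (List.nodup_append.mp (by simpa using hnd)).2.2
        have hxn : x ∉ rest.flatten := fun hmem => hne x hx x hmem rfl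
        have hq' : x ∉ q := fun hxq => hxn (List.mem_flatten.mpr ⟨q, hq, hxq⟩)
        simpa using hq'
      by_cases cd : det ∈ g <;> by_cases cv : vlm ∈ g
      · -- both in g
        have hd0 : pvLkp rest (i + 1) det = none :=
          pv_lkp_none det rest (i + 1) (hdisj det cd)
        have hv0 : pvLkp rest (i + 1) vlm = none :=
          pv_lkp_none vlm rest (i + 1) (hdisj vlm cv)
        simp [pvLoop2, pvLkp, hd0, hv0, cd, cv]
      · -- det in g, vlm not
        have hd0 : pvLkp rest (i + 1) det = none :=
          pv_lkp_none det rest (i + 1) (hdisj det cd)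
        have hloop : pvLoop2 det vlm rest = false :=
          pv_loop2_false det vlm rest
            (fun q hq => Or.inl (hdisj det cd q hq))
        rcases hv : pvLkp rest (i + 1) vlm with _ | j
        · simp [pvLoop2, pvLkp, hd0, hv, hloop, cd, cv]
        · have hj := pv_lkp_ge vlm rest (i + 1) j hv
          simp [pvLoop2, pvLkp, hd0, hv, hloop, cd, cv]
          omega
      · -- vlm in g, det not
        have hv0 : pvLkp rest (i + 1) vlm = none :=
          pv_lkp_none vlm rest (i + 1) (hdisj vlm cv)
        have hloop : pvLoop2 det vlm rest = false :=
          pv_loop2_false det vlm rest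
            (fun q hq => Or.inr (hdisj vlm cv q hq))
        rcases hd : pvLkp rest (i + 1) det with _ | j
        · simp [pvLoop2, pvLkp, hd, hloop, cd, cv]
        · have hj := pv_lkp_ge det rest (i + 1) j hd
          simp [pvLoop2, pvLkp, hd, hv0, hloop, cd, cv]
          omega
      · -- neither in g
        rcases hd : pvLkp rest (i + 1) det with _ | j <;>
          rcases hv : pvLkp rest (i + 1) vlm with _ | k <;>
            simp [pvLoop2, pvLkp, hd, hv, cd, cv, ih hndr (i + 1)]

lemma pv_get?_eq (x : String) : pvWordToGroup.get? x = pvLkp pvSynGroups 0 x := by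
  have h := pv_fold_get? pvSynGroups 0 PySem.Dict.empty x
  unfold pvWordToGroup
  rw [h]
  rcases hl : pvLkp pvSynGroups 0 x with _ | j <;> simp

lemma pv_loop_eq (det vlm : String) :
    pvCheckLoop det vlm pvSynonyms.items =
      (match pvWordToGroup.get? det with
       | none => false
       | some gd => pvWordToGroup.get? vlm == some gd) := by
  have hground : pvCheckLoop det vlm pvSynonyms.items = pvLoop2 det vlm pvSynGroups := by
    simp [pvCheckLoop, pvLoop2, pvSynonyms, pvSynGroups]
  have hnd : pvSynGroups.flatten.Nodup := by decide
  rw [hground, pv_get?_eq, pv_get?_eq, pv_loop2_eq det vlm pvSynGroups hnd 0]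

-- ===== VERDICT (by name: the statement is the Claim_ definition above) =====
theorem check_grounding_py_spec : Claim_equal_check_grounding_py := by
  intro d v _
  unfold Spec_check_grounding_py check_grounding_py check_grounding_py_alt
  show (if (PySem.Str.isIn (PySem.Str.lower d) (PySem.Str.lower v) || PySem.Str.isIn (PySem.Str.lower v) (PySem.Str.lower d)) = true then true
        else pvCheckLoop (PySem.Str.lower d) (PySem.Str.lower v) pvSynonyms.items) =
       (if (PySem.Str.isIn (PySem.Str.lower d) (PySem.Str.lower v) || PySem.Str.isIn (PySem.Str.lower v) (PySem.Str.lower d)) = true then true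
        else match pvWordToGroup.get? (PySem.Str.lower d) with
             | none => false
             | some gd => pvWordToGroup.get? (PySem.Str.lower v) == some gd)
  split
  · rfl
  · exact pv_loop_eq _ _
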